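-- pv_equiv track=rewrite | github.com/shanguanma/github_gittutorial_v1 | source-md/egs/python_libs/pron_perutt_parser.py | CheckChineseWordPron
-- ===== SOURCE A (Python) =====
-- def CheckChineseWordPron(sWords, sPhones):
--     wordList = sWords.split()
--     nWord = 0
--     for sWord in wordList:
--         if(sWord):
--             charList = list(sWord)
--             nWord += len(charList)
--     phoneList = sPhones.split()
--     nPhone = len(phoneList)
--     if(nPhone == 2*nWord):
--         return True
--     return False
-- ===== SOURCE B (Python) =====
-- def CheckChineseWordPron(sWords, sPhones):
--     phones = iter(sPhones.split())
--     for c in sWords: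
--         if not c.isspace():
--             for _ in range(2):
--                 if next(phones, None) is None:
--                     return False
--     return next(phones, None) is None
-- ===== Notes on version B (the rewrite author's own statement) =====
-- stated objective: alternative
-- what changed: B never counts characters or compares totals: it walks sWords and greedily consumes two phone tokens from an iterator over sPhones.split() per non-whitespace character, returning False on early phone exhaustion and True iff both sides run out together.
import Mathlib
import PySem

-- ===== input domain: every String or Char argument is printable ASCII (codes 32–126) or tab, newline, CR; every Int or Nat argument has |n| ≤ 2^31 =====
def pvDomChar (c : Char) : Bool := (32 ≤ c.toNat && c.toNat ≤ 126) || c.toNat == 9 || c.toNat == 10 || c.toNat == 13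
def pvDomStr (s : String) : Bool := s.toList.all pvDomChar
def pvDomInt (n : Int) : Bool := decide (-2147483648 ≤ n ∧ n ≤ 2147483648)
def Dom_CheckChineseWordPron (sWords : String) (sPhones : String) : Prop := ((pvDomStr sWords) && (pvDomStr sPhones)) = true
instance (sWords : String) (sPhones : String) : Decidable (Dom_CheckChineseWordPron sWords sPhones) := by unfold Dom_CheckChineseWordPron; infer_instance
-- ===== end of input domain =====

-- B replaces A's count-and-compare (sum word lengths, compare with phone count) by a
-- matching scan: consume two phone tokens per non-whitespace character of sWords,
-- succeeding iff both sides exhaust together (alternative decomposition, same cost).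


-- ===== PORT A =====
def CheckChineseWordPron (sWords : String) (sPhones : String) : Bool :=
  let wordList := PySem.Chars.split₀ sWords.toList
  let nWord : Int := wordList.foldl (fun nWord sWord =>
    if ¬ sWord.isEmpty then
      let charList := sWord
      nWord + (charList.length : Int)
    else nWord) 0
  let phoneList := PySem.Chars.split₀ sPhones.toList
  let nPhone : Int := phoneList.length
  if nPhone = 2 * nWord then true else false

-- ===== PORT B =====
-- B's loop over sWords' characters, with the phone iterator as explicit remaining-list
-- state; the inner `for _ in range(2)` pops one phone per step and returns False when
-- `next` is exhausted (the [] and [_] cases).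
def pvConsume : List Char → List (List Char) → Bool
  | [], phones => phones.isEmpty
  | c :: rest, phones =>
    if PySem.Chars.isspace c then pvConsume rest phones
    else
      match phones with
      | [] => false
      | [_] => false
      | _ :: _ :: ps => pvConsume rest ps

def CheckChineseWordPron_alt (sWords : String) (sPhones : String) : Bool :=
  pvConsume sWords.toList (PySem.Chars.split₀ sPhones.toList)

-- ===== PRECONDITION & SPEC =====
def Spec_CheckChineseWordPron (sWords : String) (sPhones : String) (out : Bool) : Prop := out = CheckChineseWordPron_alt sWords sPhones
instance (sWords : String) (sPhones : String) (out : Bool) : Decidable (Spec_CheckChineseWordPron sWords sPhones out) := by unfold Spec_CheckChineseWordPron; infer_instance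

-- ===== CLAIM (what is proved, stated in full; the proofs are below) =====
def Claim_equal_CheckChineseWordPron : Prop := ∀ (sWords : String) (sPhones : String), Dom_CheckChineseWordPron sWords sPhones → Spec_CheckChineseWordPron sWords sPhones (CheckChineseWordPron sWords sPhones)

-- ===== LEMMAS AND PROOFS =====

-- `split₀.go` invariant: total length of the produced words = pending accumulators + non-whitespace chars left.
lemma sumW_go (s cur : List Char) (acc : List (List Char)) :
    ((PySem.Chars.split₀.go s cur acc).map List.length).sum
      = (acc.map List.length).sum + cur.length + s.countP (fun c => ! PySem.Chars.isspace c) := by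
  induction s generalizing cur acc with
  | nil =>
    by_cases h : cur.isEmpty <;>
      simp_all [PySem.Chars.split₀.go, List.isEmpty_iff, List.countP_nil]
  | cons c rest ih =>
    by_cases hs : PySem.Chars.isspace c
    · by_cases h : cur.isEmpty <;>
        simp_all [PySem.Chars.split₀.go, List.isEmpty_iff]; omega
    · simp_all [PySem.Chars.split₀.go]
      omega

-- total length of the words of split₀ = number of non-whitespace characters
lemma sumW_split₀ (s : List Char) :
    ((PySem.Chars.split₀ s).map List.length).sum
      = s.countP (fun c => ! PySem.Chars.isspace c) := by
  simpa using sumW_go s [] []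

-- A's guarded summing loop computes the total length of the words.
lemma foldl_len (ws : List (List Char)) (n : Int) :
    ws.foldl (fun nWord sWord =>
      if ¬ sWord.isEmpty then nWord + (sWord.length : Int) else nWord) n
      = n + ((ws.map List.length).sum : Nat) := by
  induction ws generalizing n with
  | nil => simp
  | cons w ws ih =>
    rw [List.foldl_cons, ih]
    by_cases h : w.isEmpty
    · rw [List.isEmpty_iff] at h
      simp [h]
    · simp [h, List.map_cons]
      ring

-- B's matching scan succeeds iff the phone list has exactly twice as many entries
-- as there are non-whitespace characters to pair them with.
lemma pvConsume_eq (cs : List Char) (phones : List (List Char)) :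
    pvConsume cs phones = true ↔ phones.length = 2 * cs.countP (fun c => ! PySem.Chars.isspace c) := by
  induction cs generalizing phones with
  | nil => cases phones <;> simp [pvConsume]
  | cons c rest ih =>
    rw [pvConsume.eq_def]
    by_cases hs : PySem.Chars.isspace c
    · simpa [hs] using ih phones
    · rcases phones with _ | ⟨p, _ | ⟨q, ps⟩⟩ <;>
        simp [hs, ih, List.countP_cons] <;> omega

-- ===== VERDICT (by name: the statement is the Claim_ definition above) =====
theorem CheckChineseWordPron_spec : Claim_equal_CheckChineseWordPron := by
  intro sWords sPhones _
  unfold Spec_CheckChineseWordPron CheckChineseWordPron CheckChineseWordPron_alt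
  simp only [foldl_len, sumW_split₀]
  split_ifs with h
  · symm
    rw [pvConsume_eq]
    omega
  · symm
    rw [Bool.eq_false_iff, Ne, pvConsume_eq]
    omega
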